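-- pv_equiv track=rewrite | github.com/xenco/AOC18 | 3/2.py | weaveClaims
-- ===== SOURCE A (Python) =====
-- def weaveClaims(fabric, claims):
--     for claim in claims:
--         for x in range(claim["left"], claim["left"] + claim["width"]):
--             for y in range(claim["top"], claim["top"] + claim["height"]):
--                 if fabric[x][y] == "    ":
--                     fabric[x][y] = ("0000" + str(claim["claim_id"]))[-4:]
--                 else:
--                     fabric[x][y] = "XXXX"
--     return fabric
-- ===== SOURCE B (Python) =====
-- def weaveClaims(fabric, claims):
--     for x in range(len(fabric)):
--         row = fabric[x]
--         for y in range(len(row)):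
--             cover = [c for c in claims
--                      if c["left"] <= x < c["left"] + c["width"]
--                      and c["top"] <= y < c["top"] + c["height"]]
--             if cover:
--                 if len(cover) == 1 and row[y] == "    ":
--                     row[y] = ("0000" + str(cover[0]["claim_id"]))[-4:]
--                 else:
--                     row[y] = "XXXX"
--     return fabric
-- ===== Notes on version B (the rewrite author's own statement) =====
-- stated objective: alternative
-- what changed: A paints each claim's rectangle into the fabric sequentially, overwriting cells as it goes; B never interleaves: it scans the fabric once and classifies each cell directly from the list of claims covering it (untouched, single blank cover -> formatted id, otherwise 'XXXX').
import Mathlib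
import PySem

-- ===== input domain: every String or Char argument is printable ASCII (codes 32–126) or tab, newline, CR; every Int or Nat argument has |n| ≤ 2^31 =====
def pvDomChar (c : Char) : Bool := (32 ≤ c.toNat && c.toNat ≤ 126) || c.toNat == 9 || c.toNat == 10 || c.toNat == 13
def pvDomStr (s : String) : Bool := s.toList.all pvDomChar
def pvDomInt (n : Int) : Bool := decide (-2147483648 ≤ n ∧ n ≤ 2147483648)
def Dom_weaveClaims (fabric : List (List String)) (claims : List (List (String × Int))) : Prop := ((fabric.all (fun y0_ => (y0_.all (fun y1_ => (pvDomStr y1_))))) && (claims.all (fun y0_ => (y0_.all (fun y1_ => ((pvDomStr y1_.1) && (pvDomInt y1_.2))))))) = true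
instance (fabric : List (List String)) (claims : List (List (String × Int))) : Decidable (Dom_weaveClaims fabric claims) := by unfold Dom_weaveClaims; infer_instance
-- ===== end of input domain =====

-- B replaces A's claim-by-claim painting with a single scan of the fabric that classifies each
-- cell from the list of claims covering it (objective: alternative decomposition, not speed).
-- Both A and B mutate `fabric` in place in Python the same way; the theorems are about the
-- returned value.

-- claim["k"]: first-match lookup in the association list (shared by both Pythons' dict accesses)
def pvLookup? (c : List (String × Int)) (k : String) : Option Int :=
  (c.find? (fun p => p.1 == k)).map (fun p => p.2)

def pvLookupD (c : List (String × Int)) (k : String) : Int :=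
  (pvLookup? c k).getD 0

-- ("0000" + str(cid))[-4:]
def pvFmt (cid : Int) : String :=
  PySem.Str.slice (String.ofList ("0000".toList ++ (PySem.Int.toStr cid).toList)) (some (-4)) none

-- ===== PORT A =====
-- fabric[x][y] (read) and fabric[x][y] = v (write), Python index semantics; pySetD/pyGetD are
-- exact wherever the index is in range (out-of-range raising is excluded by Pre_).
def pvRead2 (fab : List (List String)) (x y : Int) : String :=
  PySem.List.pyGetD (PySem.List.pyGetD fab x []) y ""

def pvSet2 (fab : List (List String)) (x y : Int) (v : String) : List (List String) :=
  PySem.List.pySetD fab x (PySem.List.pySetD (PySem.List.pyGetD fab x []) y v)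

def pvPaint (fab : List (List String)) (x y cid : Int) : List (List String) :=
  if pvRead2 fab x y = "    " then pvSet2 fab x y (pvFmt cid) else pvSet2 fab x y "XXXX"

def weaveClaims (fabric : List (List String)) (claims : List (List (String × Int))) : List (List String) :=
  claims.foldl (fun fab c =>
    (PySem.List.pyRange (pvLookupD c "left") (pvLookupD c "left" + pvLookupD c "width") 1).foldl (fun fab x =>
      (PySem.List.pyRange (pvLookupD c "top") (pvLookupD c "top" + pvLookupD c "height") 1).foldl (fun fab y =>
        pvPaint fab x y (pvLookupD c "claim_id")) fab) fab) fabric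

-- ===== PORT B =====
-- c["left"] <= x < c["left"]+c["width"] and c["top"] <= y < c["top"]+c["height"]
def pvCovers (c : List (String × Int)) (x y : Int) : Bool :=
  decide (pvLookupD c "left" ≤ x ∧ x < pvLookupD c "left" + pvLookupD c "width" ∧
          pvLookupD c "top" ≤ y ∧ y < pvLookupD c "top" + pvLookupD c "height")

def weaveClaims_alt (fabric : List (List String)) (claims : List (List (String × Int))) : List (List String) :=
  fabric.mapIdx (fun x row => row.mapIdx (fun y cell =>
    match claims.filter (fun c => pvCovers c (x : Int) (y : Int)) with
    | [] => cell
    | c :: rest => if rest = [] ∧ cell = "    " then pvFmt (pvLookupD c "claim_id") else "XXXX"))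

-- ===== PRECONDITION & SPEC =====
-- Pre_ excludes inputs on which A raises (a claim rectangle whose cells Python cannot index, a
-- missing dict key), claims whose nonempty rectangle starts at a negative left/top — there A
-- silently paints wrapped-around cells counted from the opposite edge, an accident of Python's
-- negative indexing — and, to stay closed-form, claims with a nonempty rectangle but no
-- "claim_id" key even when A never reads that key because no covered cell is blank.
def Pre_weaveClaims (fabric : List (List String)) (claims : List (List (String × Int))) : Prop :=
  ∀ c ∈ claims,
    (pvLookup? c "left").isSome = true ∧ (pvLookup? c "width").isSome = true ∧
    (0 < pvLookupD c "width" → (pvLookup? c "top").isSome = true ∧ (pvLookup? c "height").isSome = true) ∧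
    (0 < pvLookupD c "width" → 0 < pvLookupD c "height" →
      (pvLookup? c "claim_id").isSome = true ∧
      0 ≤ pvLookupD c "left" ∧ pvLookupD c "left" + pvLookupD c "width" ≤ (fabric.length : Int) ∧
      0 ≤ pvLookupD c "top" ∧
      ∀ x ∈ PySem.List.pyRange (pvLookupD c "left") (pvLookupD c "left" + pvLookupD c "width") 1,
        pvLookupD c "top" + pvLookupD c "height" ≤ ((PySem.List.pyGetD fabric x []).length : Int))

instance (fabric : List (List String)) (claims : List (List (String × Int))) : Decidable (Pre_weaveClaims fabric claims) := by
  unfold Pre_weaveClaims; infer_instance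

def pvWitness_weaveClaims : List (List String) × (List (List (String × Int))) :=
  ([["    ", "ab"], ["    "]],
   [[("left", 0), ("width", 1), ("top", 0), ("height", 2), ("claim_id", 3)],
    [("left", 0), ("width", 2), ("top", 0), ("height", 1), ("claim_id", 7)]])

def Spec_weaveClaims (fabric : List (List String)) (claims : List (List (String × Int))) (out : List (List String)) : Prop := out = weaveClaims_alt fabric claims
instance (fabric : List (List String)) (claims : List (List (String × Int))) (out : List (List String)) : Decidable (Spec_weaveClaims fabric claims out) := by unfold Spec_weaveClaims; infer_instance

-- ===== CLAIM (what is proved, stated in full; the proofs are below) =====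
def Claim_equal_weaveClaims : Prop := ∀ (fabric : List (List String)) (claims : List (List (String × Int))), Dom_weaveClaims fabric claims → Pre_weaveClaims fabric claims → Spec_weaveClaims fabric claims (weaveClaims fabric claims)

-- ===== LEMMAS AND PROOFS =====

-- The flattened list of painted cells (x, y, claim_id), in A's visiting order.
def pvCells (claims : List (List (String × Int))) : List (Int × Int × Int) :=
  claims.flatMap (fun c =>
    (PySem.List.pyRange (pvLookupD c "left") (pvLookupD c "left" + pvLookupD c "width") 1).flatMap (fun x =>
      (PySem.List.pyRange (pvLookupD c "top") (pvLookupD c "top" + pvLookupD c "height") 1).map (fun y =>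
        (x, y, pvLookupD c "claim_id"))))

def pvFold (L : List (Int × Int × Int)) (fab : List (List String)) : List (List String) :=
  L.foldl (fun fab t => pvPaint fab t.1 t.2.1 t.2.2) fab

theorem pvFold_flatMap {α : Type} (f : α → List (Int × Int × Int)) (l : List α) (fab : List (List String)) :
    pvFold (l.flatMap f) fab = l.foldl (fun fab a => pvFold (f a) fab) fab := by
  induction l generalizing fab with
  | nil => rfl
  | cons a l ih =>
    simp only [List.flatMap_cons, List.foldl_cons, pvFold, List.foldl_append]
    exact ih _

theorem weaveClaims_eq_pvFold (fabric : List (List String)) (claims : List (List (String × Int))) :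
    weaveClaims fabric claims = pvFold (pvCells claims) fabric := by
  rw [weaveClaims, pvCells, pvFold_flatMap]
  congr 1
  funext fab c
  rw [pvFold_flatMap]
  congr 1
  funext fab2 x
  rw [pvFold, List.foldl_map]

theorem digitChar_ne_space (n : Nat) : Nat.digitChar n ≠ ' ' := by
  by_cases h : n < 16
  · interval_cases n <;> decide
  · have h2 : Nat.digitChar n = '*' := by
      unfold Nat.digitChar
      rw [if_neg (by omega), if_neg (by omega), if_neg (by omega), if_neg (by omega),
          if_neg (by omega), if_neg (by omega), if_neg (by omega), if_neg (by omega),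
          if_neg (by omega), if_neg (by omega), if_neg (by omega), if_neg (by omega),
          if_neg (by omega), if_neg (by omega), if_neg (by omega), if_neg (by omega)]
    rw [h2]; decide

theorem toDigitsCore_no_space (b fuel : Nat) : ∀ (m : Nat) (ds : List Char), ' ' ∉ ds → ' ' ∉ Nat.toDigitsCore b fuel m ds := by
  induction fuel with
  | zero => intro m ds h; simpa [Nat.toDigitsCore] using h
  | succ fuel ih =>
    intro m ds h
    rw [Nat.toDigitsCore]
    split
    · intro hc; rcases List.mem_cons.mp hc with h1 | h1
      · exact digitChar_ne_space _ h1.symm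
      · exact h h1
    · apply ih
      intro hc; rcases List.mem_cons.mp hc with h1 | h1
      · exact digitChar_ne_space _ h1.symm
      · exact h h1

theorem toChars_no_space (n : Int) : ' ' ∉ PySem.Int.toChars n := by
  unfold PySem.Int.toChars
  split
  · intro hc; rcases List.mem_cons.mp hc with h1 | h1
    · exact absurd h1 (by decide)
    · exact toDigitsCore_no_space 10 _ _ [] (by simp) h1
  · exact toDigitsCore_no_space 10 _ _ [] (by simp)

theorem pvFmt_ne_blank (cid : Int) : pvFmt cid ≠ "    " := by
  intro h
  have h2 := congrArg String.toList h
  rw [pvFmt, PySem.Str.toList_slice, String.toList_ofList] at h2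
  simp only [PySem.Chars.slice] at h2
  rw [PySem.List.slice_from_neg_ofNat _ 4 (by norm_num)] at h2
  have hm : ' ' ∈ List.drop (("0000".toList ++ (PySem.Int.toStr cid).toList).length - 4) ("0000".toList ++ (PySem.Int.toStr cid).toList) := by
    rw [h2]; decide
  have hm2 := List.mem_of_mem_drop hm
  rcases List.mem_append.mp hm2 with h1 | h1
  · exact absurd h1 (by decide)
  · rw [PySem.Int.toStr, String.toList_ofList] at h1
    exact toChars_no_space cid h1

theorem pvRead2_pvSet2 (fab : List (List String)) (a b : Int) (v : String) (x y : Int)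
    (ha : 0 ≤ a) (ha2 : a < (fab.length : Int)) (hb : 0 ≤ b)
    (hb2 : b < ((PySem.List.pyGetD fab a []).length : Int)) (hx : 0 ≤ x) (hy : 0 ≤ y) :
    pvRead2 (pvSet2 fab a b v) x y = if a = x ∧ b = y then v else pvRead2 fab x y := by
  obtain ⟨an, rfl⟩ : ∃ n : Nat, a = (n : Int) := ⟨a.toNat, (Int.toNat_of_nonneg ha).symm⟩
  obtain ⟨bn, rfl⟩ : ∃ n : Nat, b = (n : Int) := ⟨b.toNat, (Int.toNat_of_nonneg hb).symm⟩
  obtain ⟨xn, rfl⟩ : ∃ n : Nat, x = (n : Int) := ⟨x.toNat, (Int.toNat_of_nonneg hx).symm⟩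
  obtain ⟨yn, rfl⟩ : ∃ n : Nat, y = (n : Int) := ⟨y.toNat, (Int.toNat_of_nonneg hy).symm⟩
  have han : an < fab.length := by exact_mod_cast ha2
  have hbn : bn < (PySem.List.pyGetD fab (an : Int) []).length := by exact_mod_cast hb2
  rw [pvSet2, pvRead2, PySem.List.pyGetD_pySetD_natCast _ an xn _ _ han]
  by_cases hax : xn = an
  · subst hax
    rw [if_pos rfl, PySem.List.pyGetD_pySetD_natCast _ bn yn _ _ hbn]
    by_cases hby : yn = bn
    · subst hby; simp
    · rw [if_neg hby, if_neg (by simp; omega)]; rfl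
  · rw [if_neg hax, if_neg (by intro hc; exact hax (by exact_mod_cast hc.1.symm))]; rfl

theorem pvSet2_length (fab : List (List String)) (a b : Int) (v : String) :
    (pvSet2 fab a b v).length = fab.length := by
  simp [pvSet2, PySem.List.length_pySetD]

theorem pvSet2_rowLength (fab : List (List String)) (a b : Int) (v : String) (i : Int)
    (ha : 0 ≤ a) (ha2 : a < (fab.length : Int)) (hi : 0 ≤ i) :
    ((PySem.List.pyGetD (pvSet2 fab a b v) i []).length) = ((PySem.List.pyGetD fab i []).length) := by
  obtain ⟨an, rfl⟩ : ∃ n : Nat, a = (n : Int) := ⟨a.toNat, (Int.toNat_of_nonneg ha).symm⟩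
  obtain ⟨ni, rfl⟩ : ∃ n : Nat, i = (n : Int) := ⟨i.toNat, (Int.toNat_of_nonneg hi).symm⟩
  have han : an < fab.length := by exact_mod_cast ha2
  rw [pvSet2, PySem.List.pyGetD_pySetD_natCast _ an ni _ _ han]
  split
  · next h => subst h; rw [PySem.List.length_pySetD]
  · rfl


theorem pvPaint_length (fab : List (List String)) (x y cid : Int) :
    (pvPaint fab x y cid).length = fab.length := by
  unfold pvPaint; split <;> apply pvSet2_length

theorem pvPaint_rowLength (fab : List (List String)) (a b cid : Int) (i : Int)
    (ha : 0 ≤ a) (ha2 : a < (fab.length : Int)) (hi : 0 ≤ i) :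
    ((PySem.List.pyGetD (pvPaint fab a b cid) i []).length) = ((PySem.List.pyGetD fab i []).length) := by
  unfold pvPaint; split <;> exact pvSet2_rowLength _ _ _ _ _ ha ha2 hi

theorem pvPaint_read (fab : List (List String)) (a b cid : Int) (x y : Int)
    (ha : 0 ≤ a) (ha2 : a < (fab.length : Int)) (hb : 0 ≤ b)
    (hb2 : b < ((PySem.List.pyGetD fab a []).length : Int)) (hx : 0 ≤ x) (hy : 0 ≤ y) :
    pvRead2 (pvPaint fab a b cid) x y =
      if a = x ∧ b = y then (if pvRead2 fab x y = "    " then pvFmt cid else "XXXX")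
      else pvRead2 fab x y := by
  unfold pvPaint
  by_cases hc : a = x ∧ b = y
  · obtain ⟨rfl, rfl⟩ := hc
    split
    next => rw [pvRead2_pvSet2 _ _ _ _ _ _ ha ha2 hb hb2 hx hy, if_pos ⟨rfl, rfl⟩]
    next => rw [pvRead2_pvSet2 _ _ _ _ _ _ ha ha2 hb hb2 hx hy, if_pos ⟨rfl, rfl⟩]
  · split <;> rw [pvRead2_pvSet2 _ _ _ _ _ _ ha ha2 hb hb2 hx hy, if_neg hc]

theorem pvFold_length (L : List (Int × Int × Int)) (fab : List (List String)) :
    (pvFold L fab).length = fab.length := by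
  induction L generalizing fab with
  | nil => rfl
  | cons t L ih => rw [pvFold, List.foldl_cons, ← pvFold, ih, pvPaint_length]

theorem pvFold_rowLength (L : List (Int × Int × Int)) (fab : List (List String)) (i : Int)
    (hi : 0 ≤ i)
    (hL : ∀ t ∈ L, 0 ≤ t.1 ∧ t.1 < (fab.length : Int) ∧ 0 ≤ t.2.1 ∧
          t.2.1 < ((PySem.List.pyGetD fab t.1 []).length : Int)) :
    ((PySem.List.pyGetD (pvFold L fab) i []).length) = ((PySem.List.pyGetD fab i []).length) := by
  induction L generalizing fab with
  | nil => rfl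
  | cons t L ih =>
    obtain ⟨h1, h2, h3, h4⟩ := hL t (List.mem_cons_self ..)
    rw [pvFold, List.foldl_cons, ← pvFold, ih, pvPaint_rowLength _ _ _ _ _ h1 h2 hi]
    intro u hu
    obtain ⟨g1, g2, g3, g4⟩ := hL u (List.mem_cons_of_mem _ hu)
    refine ⟨g1, by rw [pvPaint_length]; exact g2, g3, by rw [pvPaint_rowLength _ _ _ _ _ h1 h2 g1]; exact g4⟩

theorem pvFold_read (L : List (Int × Int × Int)) (fab : List (List String)) (x y : Int)
    (hx : 0 ≤ x) (hy : 0 ≤ y)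
    (hL : ∀ t ∈ L, 0 ≤ t.1 ∧ t.1 < (fab.length : Int) ∧ 0 ≤ t.2.1 ∧
          t.2.1 < ((PySem.List.pyGetD fab t.1 []).length : Int)) :
    pvRead2 (pvFold L fab) x y =
      match L.filter (fun t => t.1 == x && t.2.1 == y) with
      | [] => pvRead2 fab x y
      | t :: rest => if rest = [] ∧ pvRead2 fab x y = "    " then pvFmt t.2.2 else "XXXX" := by
  induction L generalizing fab with
  | nil => rfl
  | cons t L ih =>
    obtain ⟨a, b, cid⟩ := t
    obtain ⟨h1, h2, h3, h4⟩ := hL _ (List.mem_cons_self ..)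
    have hL' : ∀ u ∈ L, 0 ≤ u.1 ∧ u.1 < ((pvPaint fab a b cid).length : Int) ∧ 0 ≤ u.2.1 ∧
          u.2.1 < ((PySem.List.pyGetD (pvPaint fab a b cid) u.1 []).length : Int) := by
      intro u hu
      obtain ⟨g1, g2, g3, g4⟩ := hL u (List.mem_cons_of_mem _ hu)
      exact ⟨g1, by rw [pvPaint_length]; exact_mod_cast g2, g3,
        by rw [pvPaint_rowLength _ _ _ _ _ h1 h2 g1]; exact g4⟩
    rw [pvFold, List.foldl_cons, ← pvFold, ih _ hL', List.filter_cons]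
    by_cases hc : a = x ∧ b = y
    · obtain ⟨rfl, rfl⟩ := hc
      rw [if_pos (show ((a == a && b == b) = true) by simp)]
      have hread : pvRead2 (pvPaint fab a b cid) a b =
          (if pvRead2 fab a b = "    " then pvFmt cid else "XXXX") := by
        rw [pvPaint_read _ _ _ _ _ _ h1 h2 h3 h4 hx hy, if_pos ⟨rfl, rfl⟩]
      cases hf : L.filter (fun t => t.1 == a && t.2.1 == b) with
      | nil =>
        simp only [hread]
        split_ifs <;> simp_all
      | cons u rest =>
        have hne : ¬(rest = [] ∧ pvRead2 (pvPaint fab a b cid) a b = "    ") := by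
          rintro ⟨-, hcc⟩
          rw [hread] at hcc
          split at hcc
          · exact pvFmt_ne_blank _ hcc
          · exact absurd hcc (by decide)
        show (if rest = [] ∧ pvRead2 (pvPaint fab a b cid) a b = "    " then pvFmt u.2.2 else "XXXX")
          = (if (u :: rest : List (Int × Int × Int)) = [] ∧ pvRead2 fab a b = "    " then pvFmt (a, b, cid).2.2 else "XXXX")
        rw [if_neg hne, if_neg (by simp)]
    · have hfalse : ((a == x && b == y) = false) := by
        rcases (not_and_or.mp hc) with h | h <;> simp [h]
      rw [hfalse, if_neg (by simp)]
      have : pvRead2 (pvPaint fab a b cid) x y = pvRead2 fab x y := by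
        rw [pvPaint_read _ _ _ _ _ _ h1 h2 h3 h4 hx hy, if_neg hc]
      rw [this]

theorem pyRange_filter_eq_aux (n : Nat) : ∀ (a b y : Int), (b - a).toNat = n →
    (PySem.List.pyRange a b 1).filter (fun v => v == y) = if a ≤ y ∧ y < b then [y] else [] := by
  induction n with
  | zero =>
    intro a b y hn
    have hba : b ≤ a := by omega
    rw [PySem.List.pyRange_one_eq_nil hba, List.filter_nil, if_neg (by omega)]
  | succ n ih =>
    intro a b y hn
    have hab : a < b := by omega
    rw [PySem.List.pyRange_one_cons hab, List.filter_cons, ih (a + 1) b y (by omega)]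
    by_cases hay : a = y
    · subst hay
      rw [if_pos (by simp), if_neg (by omega), if_pos (by omega)]
    · have hiff : (a + 1 ≤ y ∧ y < b) ↔ (a ≤ y ∧ y < b) := by
        constructor <;> rintro ⟨h1, h2⟩ <;> exact ⟨by omega, h2⟩
      rw [if_neg (by simp [hay]), if_congr hiff rfl rfl]

theorem pyRange_filter_eq (a b y : Int) :
    (PySem.List.pyRange a b 1).filter (fun v => v == y) = if a ≤ y ∧ y < b then [y] else [] :=
  pyRange_filter_eq_aux _ a b y rfl

theorem flatMap_single {β : Type} (l : List Int) (hnd : l.Nodup) (F : Int → List β) (x : Int)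
    (h : ∀ a ∈ l, a ≠ x → F a = []) : l.flatMap F = if x ∈ l then F x else [] := by
  induction l with
  | nil => rfl
  | cons a l ih =>
    rw [List.flatMap_cons]
    by_cases hax : a = x
    · subst hax
      have : l.flatMap F = [] := by
        rw [List.flatMap_eq_nil_iff]
        intro u hu
        exact h u (List.mem_cons_of_mem _ hu) (fun he => (List.nodup_cons.mp hnd).1 (he ▸ hu))
      rw [this, if_pos (List.mem_cons_self ..), List.append_nil]
    · rw [h a (List.mem_cons_self ..) hax, List.nil_append,
         ih (List.nodup_cons.mp hnd).2 (fun u hu => h u (List.mem_cons_of_mem _ hu))]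
      by_cases hx : x ∈ l
      · rw [if_pos hx, if_pos (List.mem_cons_of_mem _ hx)]
      · rw [if_neg hx, if_neg (by simp [hx, Ne.symm hax])]

theorem pvCells_filter (claims : List (List (String × Int))) (x y : Int) :
    (pvCells claims).filter (fun t => t.1 == x && t.2.1 == y) =
      (claims.filter (fun c => pvCovers c x y)).map (fun c => (x, y, pvLookupD c "claim_id")) := by
  induction claims with
  | nil => rfl
  | cons c cs ih =>
    rw [pvCells, List.flatMap_cons, ← pvCells, List.filter_append, ih, List.filter_cons]
    have hF : ∀ a : Int, ((PySem.List.pyRange (pvLookupD c "top") (pvLookupD c "top" + pvLookupD c "height") 1).map (fun yv =>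
        (a, yv, pvLookupD c "claim_id"))).filter (fun t => t.1 == x && t.2.1 == y) =
        if a = x then ((PySem.List.pyRange (pvLookupD c "top") (pvLookupD c "top" + pvLookupD c "height") 1).filter
          (fun v => v == y)).map (fun yv => (a, yv, pvLookupD c "claim_id")) else [] := by
      intro a
      rw [List.filter_map]
      by_cases hax : a = x
      · rw [if_pos hax]
        have hpe : ((fun t : Int × Int × Int => t.1 == x && t.2.1 == y) ∘ (fun yv => (a, yv, pvLookupD c "claim_id"))) = fun v => v == y := by
          funext v; simp [hax]
        rw [hpe]
      · rw [if_neg hax]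
        have hpe : ((fun t : Int × Int × Int => t.1 == x && t.2.1 == y) ∘ (fun yv => (a, yv, pvLookupD c "claim_id"))) = fun _ => false := by
          funext v; simp [hax]
        rw [hpe, List.filter_false, List.map_nil]
    have hflat := flatMap_single (PySem.List.pyRange (pvLookupD c "left") (pvLookupD c "left" + pvLookupD c "width") 1)
        (PySem.List.nodup_pyRange_one _ _)
        (fun a => if a = x then ((PySem.List.pyRange (pvLookupD c "top") (pvLookupD c "top" + pvLookupD c "height") 1).filter
          (fun v => v == y)).map (fun yv => (a, yv, pvLookupD c "claim_id")) else [])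
        x (fun a _ ha => if_neg ha)
    rw [List.filter_flatMap]
    rw [funext hF, hflat]
    beta_reduce
    rw [if_pos rfl, pyRange_filter_eq]
    by_cases hx : x ∈ PySem.List.pyRange (pvLookupD c "left") (pvLookupD c "left" + pvLookupD c "width") 1
    · rw [if_pos hx]
      have hxr := (PySem.List.mem_pyRange_one).mp hx
      by_cases hy : pvLookupD c "top" ≤ y ∧ y < pvLookupD c "top" + pvLookupD c "height"
      · rw [if_pos hy, if_pos (by simp only [pvCovers, decide_eq_true_eq]; exact ⟨hxr.1, hxr.2, hy.1, hy.2⟩), List.map_cons, List.map_nil, List.map_cons, List.singleton_append]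
      · rw [if_neg hy, if_neg (by simp only [pvCovers, decide_eq_true_eq, not_and]; intro h1 h2 h3 h4; exact hy ⟨h3, h4⟩), List.map_nil, List.nil_append]
    · rw [if_neg hx, if_neg (by simp only [pvCovers, decide_eq_true_eq, not_and]; intro h1 h2; exact absurd ((PySem.List.mem_pyRange_one).mpr ⟨h1, h2⟩) hx), List.nil_append]

theorem getElem_eq_pyGetD (l : List (List String)) (xn : Nat) (h : xn < l.length) :
    l[xn] = PySem.List.pyGetD l (xn : Int) [] := by
  rw [PySem.List.pyGetD_natCast, List.getD_eq_getElem?_getD, List.getElem?_eq_getElem h, Option.getD_some]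

theorem pvRead2_getElem (l : List (List String)) (xn yn : Nat) (h1 : xn < l.length) (h2 : yn < l[xn].length) :
    pvRead2 l (xn : Int) (yn : Int) = l[xn][yn] := by
  rw [pvRead2, ← getElem_eq_pyGetD _ _ h1, PySem.List.pyGetD_natCast, List.getD_eq_getElem?_getD,
     List.getElem?_eq_getElem h2, Option.getD_some]

-- ===== VERDICT (by name: the statement is the Claim_ definition above) =====
theorem weaveClaims_spec : Claim_equal_weaveClaims := by
  unfold Claim_equal_weaveClaims
  intro fabric claims _ hpre
  unfold Spec_weaveClaims
  rw [weaveClaims_eq_pvFold]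
  have hL : ∀ t ∈ pvCells claims, 0 ≤ t.1 ∧ t.1 < (fabric.length : Int) ∧ 0 ≤ t.2.1 ∧
      t.2.1 < ((PySem.List.pyGetD fabric t.1 []).length : Int) := by
    intro t ht
    rw [pvCells, List.mem_flatMap] at ht
    obtain ⟨c, hc, ht⟩ := ht
    rw [List.mem_flatMap] at ht
    obtain ⟨xv, hxv, ht⟩ := ht
    rw [List.mem_map] at ht
    obtain ⟨yv, hyv, rfl⟩ := ht
    have hx := (PySem.List.mem_pyRange_one).mp hxv
    have hy := (PySem.List.mem_pyRange_one).mp hyv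
    have hw : 0 < pvLookupD c "width" := by omega
    have hh : 0 < pvLookupD c "height" := by omega
    obtain ⟨-, -, -, h4⟩ := hpre c hc
    obtain ⟨-, hl0, hlw, ht0, hrow⟩ := h4 hw hh
    have hr := hrow xv hxv
    exact ⟨by dsimp only; omega, by dsimp only; omega, by dsimp only; omega, by dsimp only; omega⟩
  have hlenA : (pvFold (pvCells claims) fabric).length = fabric.length := pvFold_length _ _
  have hlenB : (weaveClaims_alt fabric claims).length = fabric.length := by
    unfold weaveClaims_alt; rw [List.length_mapIdx]
  apply List.ext_getElem (by rw [hlenA, hlenB])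
  intro xn h1 h2
  have hxf : xn < fabric.length := by rw [hlenA] at h1; exact h1
  have hrowA : (pvFold (pvCells claims) fabric)[xn] = PySem.List.pyGetD (pvFold (pvCells claims) fabric) (xn : Int) [] :=
    getElem_eq_pyGetD _ _ h1
  have hrowlen : ((pvFold (pvCells claims) fabric)[xn]).length = (fabric[xn]).length := by
    rw [hrowA, pvFold_rowLength _ _ _ (Int.natCast_nonneg _) hL, ← getElem_eq_pyGetD _ _ hxf]
  have hrowB : (weaveClaims_alt fabric claims)[xn] = (fabric[xn]).mapIdx (fun y cell =>
      match claims.filter (fun c => pvCovers c (xn : Int) (y : Int)) with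
      | [] => cell
      | c :: rest => if rest = [] ∧ cell = "    " then pvFmt (pvLookupD c "claim_id") else "XXXX") := by
    unfold weaveClaims_alt
    exact List.getElem_mapIdx
  apply List.ext_getElem (by rw [hrowlen, hrowB, List.length_mapIdx])
  intro yn hy1 hy2
  have hyf : yn < (fabric[xn]).length := by rw [hrowlen] at hy1; exact hy1
  have hcellA : (pvFold (pvCells claims) fabric)[xn][yn] = pvRead2 (pvFold (pvCells claims) fabric) (xn : Int) (yn : Int) :=
    (pvRead2_getElem _ _ _ h1 hy1).symm
  have hcellB : (weaveClaims_alt fabric claims)[xn][yn] =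
      (match claims.filter (fun c => pvCovers c (xn : Int) (yn : Int)) with
      | [] => fabric[xn][yn]
      | c :: rest => if rest = [] ∧ fabric[xn][yn] = "    " then pvFmt (pvLookupD c "claim_id") else "XXXX") := by
    have hgg : (weaveClaims_alt fabric claims)[xn][yn] = ((weaveClaims_alt fabric claims)[xn])[yn]'(by rw [hrowB, List.length_mapIdx]; exact hyf) := rfl
    rw [hgg]
    simp only [hrowB]
    exact List.getElem_mapIdx
  rw [hcellA, hcellB, pvFold_read _ _ _ _ (Int.natCast_nonneg _) (Int.natCast_nonneg _) hL, pvCells_filter]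
  have horig : pvRead2 fabric (xn : Int) (yn : Int) = fabric[xn][yn] := pvRead2_getElem _ _ _ hxf hyf
  cases hf : claims.filter (fun c => pvCovers c (xn : Int) (yn : Int)) with
  | nil => rw [List.map_nil]; exact horig
  | cons c rest =>
    rw [List.map_cons]
    show (if (rest.map fun c => ((xn : Int), (yn : Int), pvLookupD c "claim_id")) = [] ∧ pvRead2 fabric (xn : Int) (yn : Int) = "    "
          then pvFmt ((xn : Int), (yn : Int), pvLookupD c "claim_id").2.2 else "XXXX")
        = (if rest = [] ∧ fabric[xn][yn] = "    " then pvFmt (pvLookupD c "claim_id") else "XXXX")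
    rw [horig]
    by_cases hr : rest = []
    · subst hr
      by_cases hb : fabric[xn][yn] = "    "
      · rw [if_pos ⟨rfl, hb⟩, if_pos ⟨rfl, hb⟩]
      · rw [if_neg (by rintro ⟨-, hc2⟩; exact hb hc2), if_neg (by rintro ⟨-, hc2⟩; exact hb hc2)]
    · rw [if_neg (by rintro ⟨hc1, -⟩; exact hr (List.map_eq_nil_iff.mp hc1)),
          if_neg (by rintro ⟨hc1, -⟩; exact hr hc1)]
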